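-- pv_equiv track=rewrite | github.com/deepdoctection/deepdoctection | deepdoctection/mapper/pubstruct.py | _end_of_header
-- ===== SOURCE A (Python) =====
-- from typing import Iterable, Optional, Sequence
--
-- def _end_of_header(html: Sequence[str]) -> int:
--     index_cells = [i for i, tag in enumerate(html) if tag in ("<td>", ">")]
--     header_in_html = [i for i, tag in enumerate(html) if tag == "</thead>"]
--     index_header_end = max(header_in_html)
--     index_header = [i for i in index_cells if i < index_header_end]
--     if len(index_header):
--         last_index_header_cell = max(index_header)
--         return index_cells.index(last_index_header_cell) + 1
--     return 0
-- ===== SOURCE B (Python) =====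
-- def _end_of_header(html):
--     # last </thead> position; raises ValueError (empty max) exactly when A does
--     index_header_end = max(i for i, tag in enumerate(html) if tag == "</thead>")
--     # count cell tags strictly before it -- no positional array, no .index() lookup
--     return sum(1 for i, tag in enumerate(html) if tag in ("<td>", ">") and i < index_header_end)
-- ===== Notes on version B (the rewrite author's own statement) =====
-- stated objective: simpler
-- what changed: B drops A's index_cells positional array, the filtered index_header list and the .index(max(...))+1 reverse lookup, instead counting cell tags before the last </thead> directly in one pass.
import Mathlib
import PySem

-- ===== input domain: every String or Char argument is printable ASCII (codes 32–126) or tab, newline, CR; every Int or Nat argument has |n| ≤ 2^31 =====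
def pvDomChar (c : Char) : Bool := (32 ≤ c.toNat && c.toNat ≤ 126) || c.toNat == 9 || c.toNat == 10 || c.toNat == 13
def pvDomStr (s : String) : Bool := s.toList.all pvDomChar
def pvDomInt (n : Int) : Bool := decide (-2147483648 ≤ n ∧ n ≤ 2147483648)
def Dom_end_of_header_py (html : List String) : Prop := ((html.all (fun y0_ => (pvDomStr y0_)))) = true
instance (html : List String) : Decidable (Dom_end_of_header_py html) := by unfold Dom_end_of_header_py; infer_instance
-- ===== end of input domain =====

-- B replaces A's positional index_cells array and .index()+1 reverse lookup with a direct
-- count of cell tags before the last </thead> (simpler decomposition; return value only).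

-- ===== PORT A =====
def end_of_header_py (html : List String) : Int :=
  let index_cells := ((PySem.List.enumerate html).filter
      (fun p => p.2 == "<td>" || p.2 == ">")).map (fun p => p.1)
  let header_in_html := ((PySem.List.enumerate html).filter
      (fun p => p.2 == "</thead>")).map (fun p => p.1)
  match PySem.List.max? header_in_html (fun x => x) with               -- max([]) raises: excluded by Pre_
  | none => 0
  | some index_header_end =>
    let index_header := index_cells.filter (fun i => decide (i < index_header_end))
    if index_header.length ≠ 0 then
      match PySem.List.max? index_header (fun x => x) with
      | none => 0                                                      -- unreachable: index_header ≠ []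
      | some last_index_header_cell =>
        match PySem.List.index? index_cells last_index_header_cell with
        | none => 0                                                    -- unreachable: element is in the list
        | some j => (j : Int) + 1
    else 0

-- ===== PORT B =====
def end_of_header_py_alt (html : List String) : Int :=
  match PySem.List.max? (((PySem.List.enumerate html).filter
      (fun p => p.2 == "</thead>")).map (fun p => p.1)) (fun x => x) with  -- max(generator) raises on empty: excluded by Pre_
  | none => 0
  | some index_header_end =>
    (((PySem.List.enumerate html).filter
        (fun p => (p.2 == "<td>" || p.2 == ">") && decide (p.1 < index_header_end))).length : Int)

-- ===== PRECONDITION & SPEC =====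
-- Pre_ excludes exactly the inputs with no "</thead>" tag, where Python A raises ValueError (max of empty sequence).
def Pre_end_of_header_py (html : List String) : Prop := "</thead>" ∈ html
instance (html : List String) : Decidable (Pre_end_of_header_py html) := by unfold Pre_end_of_header_py; infer_instance
def pvWitness_end_of_header_py : List String := ["<td>", ">", "</thead>", "<td>"]
def Spec_end_of_header_py (html : List String) (out : Int) : Prop := out = end_of_header_py_alt html
instance (html : List String) (out : Int) : Decidable (Spec_end_of_header_py html out) := by unfold Spec_end_of_header_py; infer_instance

-- ===== CLAIM (what is proved, stated in full; the proofs are below) =====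
def Claim_equal_end_of_header_py : Prop := ∀ (html : List String), Dom_end_of_header_py html → Pre_end_of_header_py html → Spec_end_of_header_py html (end_of_header_py html)

-- ===== LEMMAS AND PROOFS =====

-- For a strictly increasing list l, the nonempty filter (· < e) has a max m whose first index
-- in l is (filter length - 1): exactly A's index_cells.index(max(index_header)) + 1 trick.
theorem max_filter_index (l : List Int) (e : Int) (hp : l.Pairwise (· < ·))
    (hne : l.filter (fun i => decide (i < e)) ≠ []) :
    ∃ m, PySem.List.max? (l.filter (fun i => decide (i < e))) (fun x => x) = some m ∧
      PySem.List.index? l m = some ((l.filter (fun i => decide (i < e))).length - 1) := by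
  induction l with
  | nil => simp at hne
  | cons a t ih =>
    rw [List.pairwise_cons] at hp
    obtain ⟨ha, ht⟩ := hp
    by_cases hae : a < e
    · have hf : (a :: t).filter (fun i => decide (i < e))
          = a :: t.filter (fun i => decide (i < e)) := by
        simp [hae]
      by_cases hft : t.filter (fun i => decide (i < e)) = []
      · refine ⟨a, ?_, ?_⟩
        · rw [hf, hft, PySem.List.max?_id_cons]
          simp
        · rw [hf, hft, PySem.List.index?_cons_self]
          simp
      · obtain ⟨m, hmax, hidx⟩ := ih ht hft
        have hm_mem : m ∈ t.filter (fun i => decide (i < e)) := PySem.List.max?_mem hmax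
        have hm_t : m ∈ t := List.mem_of_mem_filter hm_mem
        have ham : a < m := ha m hm_t
        obtain ⟨b, r, hbr⟩ := List.exists_cons_of_ne_nil hft
        have hb_t : b ∈ t := List.mem_of_mem_filter (hbr ▸ List.mem_cons_self)
        have hab : a < b := ha b hb_t
        refine ⟨m, ?_, ?_⟩
        · rw [hf, hbr, PySem.List.max?_id_cons]
          rw [hbr, PySem.List.max?_id_cons] at hmax
          simp [max_eq_right hab.le]; simpa using hmax
        · rw [PySem.List.index?_cons_of_ne t ham.ne, hidx, hf]
          have hlen : 1 ≤ (t.filter (fun i => decide (i < e))).length := by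
            rw [hbr]; simp
          simp only [Option.map_some, List.length_cons]
          congr 1
          omega
    · exfalso
      apply hne
      have h1 : t.filter (fun i => decide (i < e)) = [] := by
        rw [List.filter_eq_nil_iff]
        intro x hx
        have := ha x hx
        simp; omega
      simp [hae, h1]

theorem end_of_header_py_spec : Claim_equal_end_of_header_py := by
  intro html _ hpre
  unfold Spec_end_of_header_py end_of_header_py end_of_header_py_alt
  simp only []
  -- names for the shared pieces
  set E := PySem.List.enumerate html with hE
  set hdr := ((E.filter (fun p => p.2 == "</thead>")).map (fun p => p.1)) with hhdr
  set cells := ((E.filter (fun p => p.2 == "<td>" || p.2 == ">")).map (fun p => p.1)) with hcells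
  -- the header index list is nonempty, so max? returns some
  have hhdr_ne : hdr ≠ [] := by
    obtain ⟨k, hk, hget⟩ := List.mem_iff_getElem.mp hpre
    have hmem : ((0 : Int) + (k : Int), html[k]) ∈ E := by
      rw [hE, PySem.List.mem_enumerate_iff]
      exact ⟨k, hk, rfl⟩
    have : ((0 : Int) + (k : Int), html[k]) ∈ E.filter (fun p => p.2 == "</thead>") := by
      rw [List.mem_filter]
      exact ⟨hmem, by simp [hget]⟩
    intro hnil
    rw [hhdr] at hnil
    simp only [List.map_eq_nil_iff] at hnil
    simp [hnil] at this
  cases hmax : PySem.List.max? hdr (fun x => x) with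
  | none => exact absurd ((PySem.List.max?_eq_none_iff hdr (fun x => x)).mp hmax) hhdr_ne
  | some e =>
    -- cells is strictly increasing
    have hcp : cells.Pairwise (· < ·) := by
      rw [hcells, List.pairwise_map]
      exact (PySem.List.pairwise_lt_enumerate (xs := html) (s := 0)).filter _
    -- B's count equals the length of A's index_header list
    have hB : ((E.filter (fun p => (p.2 == "<td>" || p.2 == ">") && decide (p.1 < e))).length : Int)
        = ((cells.filter (fun i => decide (i < e))).length : Int) := by
      rw [hcells, List.filter_map, List.length_map, List.filter_filter]
      exact congrArg (fun l => ((List.length l : Nat) : Int))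
        (List.filter_congr (fun x _ => by simp [Bool.and_comm]))
    by_cases hih : cells.filter (fun i => decide (i < e)) = []
    · simp [hih, hB]
    · obtain ⟨m, hm, hi⟩ := max_filter_index cells e hcp hih
      have hlen : 0 < (cells.filter (fun i => decide (i < e))).length :=
        List.length_pos_iff.mpr hih
      simp only [hih, hm, hi, List.length_eq_zero_iff, ne_eq, not_false_iff]
      rw [if_pos (by simp [List.length_eq_zero_iff, hih])]
      rw [hB]
      omega
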